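-- pv_equiv track=rewrite | github.com/retroaegx/ShogiAnalyzer | server/app/core/sfen_ops.py | _parse_hands
-- ===== SOURCE A (Python) =====
-- HAND_ORDER = ["R", "B", "G", "S", "N", "L", "P"]
--
-- class SfenError(ValueError):
--     pass
--
-- def _parse_hands(hands_part: str) -> dict[str, dict[str, int]]:
--     hands = {"b": {k: 0 for k in HAND_ORDER}, "w": {k: 0 for k in HAND_ORDER}}
--     if not hands_part or hands_part == "-":
--         return hands
--     num_buf = ""
--     for ch in hands_part:
--         if ch.isdigit():
--             num_buf += ch
--             continue
--         base = ch.upper()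
--         if base not in HAND_ORDER:
--             raise SfenError(f"invalid hand piece: {ch}")
--         count = int(num_buf) if num_buf else 1
--         num_buf = ""
--         side = "b" if ch.isupper() else "w"
--         hands[side][base] += count
--     if num_buf:
--         raise SfenError("dangling number in hands")
--     return hands
-- ===== SOURCE B (Python) =====
-- HAND_ORDER = ["R", "B", "G", "S", "N", "L", "P"]
--
--
-- class SfenError(ValueError):
--     pass
--
--
-- def _tokenize(s):
--     """Split s into (count, piece-char) tokens, reading each digit run as one number."""
--     tokens = []
--     i, n = 0, len(s)
--     while i < n:
--         j = i
--         while j < n and s[j].isdigit():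
--             j += 1
--         if j == n:
--             raise SfenError("dangling number in hands")
--         ch = s[j]
--         if ch.upper() not in HAND_ORDER:
--             raise SfenError(f"invalid hand piece: {ch}")
--         tokens.append((int(s[i:j]) if j > i else 1, ch))
--         i = j + 1
--     return tokens
--
--
-- def _parse_hands(hands_part: str) -> dict[str, dict[str, int]]:
--     hands = {"b": {k: 0 for k in HAND_ORDER}, "w": {k: 0 for k in HAND_ORDER}}
--     if hands_part and hands_part != "-":
--         for count, ch in _tokenize(hands_part):
--             hands["b" if ch.isupper() else "w"][ch.upper()] += count
--     return hands
-- ===== Notes on version B (the rewrite author's own statement) =====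
-- stated objective: idiomatic
-- what changed: Replaces the char-by-char state machine with its threaded digit-buffer by a two-phase design: a tokenizer that splits the string into (count, piece) tokens (one per digit-run + letter), then a simple loop adding each token into the hand dict.
import Mathlib
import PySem

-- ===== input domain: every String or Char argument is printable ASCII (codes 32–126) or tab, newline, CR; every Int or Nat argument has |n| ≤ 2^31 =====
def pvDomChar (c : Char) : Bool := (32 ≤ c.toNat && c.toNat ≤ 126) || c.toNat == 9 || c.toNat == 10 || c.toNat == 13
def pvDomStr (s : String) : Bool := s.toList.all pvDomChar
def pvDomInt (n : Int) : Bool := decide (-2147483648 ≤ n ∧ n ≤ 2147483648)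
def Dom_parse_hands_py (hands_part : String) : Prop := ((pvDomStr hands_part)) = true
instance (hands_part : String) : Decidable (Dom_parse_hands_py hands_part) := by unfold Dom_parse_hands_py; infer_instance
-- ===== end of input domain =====

-- B replaces A's char-by-char state machine (digit buffer threaded through the loop) by a
-- two-phase tokenizer: first split the string into (count, piece-char) tokens, then apply them;
-- objective: simpler/idiomatic, same cost.

-- ===== PORT A =====
def pvHandOrder : List String := ["R", "B", "G", "S", "N", "L", "P"]

def pvInitInner : PySem.Dict String Int :=
  PySem.Dict.ofList (pvHandOrder.map (fun k => (k, (0 : Int))))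

def pvInitHands : PySem.Dict String (PySem.Dict String Int) :=
  PySem.Dict.ofList [("b", pvInitInner), ("w", pvInitInner)]

-- hands[side][base] += count (none = KeyError; both Pythons use literally this statement)
def pvAddCount (hands : PySem.Dict String (PySem.Dict String Int))
    (side base : String) (count : Int) :
    Option (PySem.Dict String (PySem.Dict String Int)) :=
  match hands.get? side with
  | none => none
  | some inner =>
    match inner.get? base with
    | none => none
    | some v => some (hands.insert side (inner.insert base (v + count)))

-- A's 'for ch in hands_part' loop; state = (num_buf, hands); none = SfenError
def pvALoop : List Char → List Char → PySem.Dict String (PySem.Dict String Int) →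
    Option (PySem.Dict String (PySem.Dict String Int) × List Char)
  | [], numBuf, hands => some (hands, numBuf)
  | c :: cs, numBuf, hands =>
    if PySem.Chars.isdigit c then
      pvALoop cs (numBuf ++ [c]) hands
    else
      -- base = ch.upper() on the one-character string ch
      let base := String.singleton (PySem.Chars.upperChar c)
      if base ∈ pvHandOrder then
        match (if numBuf = [] then some (1 : Int) else PySem.Int.ofChars? numBuf) with
        | none => none
        | some count =>
          let side := if PySem.Chars.isupper c then "b" else "w"
          match pvAddCount hands side base count with
          | none => none
          | some hands' => pvALoop cs [] hands'
      else none  -- raise SfenError(invalid hand piece)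

-- where the Python raises, the port returns [] (those inputs are outside Pre_)
def parse_hands_py (hands_part : String) : List (String × List (String × Int)) :=
  if hands_part.toList = [] ∨ hands_part.toList = ['-'] then
    pvInitHands.items.map (fun p => (p.1, p.2.items))
  else
    match pvALoop hands_part.toList [] pvInitHands with
    | none => []
    | some (hands, numBuf) =>
      if numBuf = [] then hands.items.map (fun p => (p.1, p.2.items))
      else []  -- raise SfenError(dangling number in hands)

-- ===== PORT B =====
-- _tokenize: one (count, ch) token per digit-run + piece char; none = SfenError
def pvTokenize (s : List Char) : Option (List (Int × Char)) :=
  match s with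
  | [] => some []
  | c :: cs =>
    match h : (c :: cs).dropWhile PySem.Chars.isdigit with
    | [] => none  -- j == n: dangling number in hands
    | ch :: rest =>
      if String.singleton (PySem.Chars.upperChar ch) ∈ pvHandOrder then
        let digits := (c :: cs).takeWhile PySem.Chars.isdigit
        match (if digits = [] then some (1 : Int) else PySem.Int.ofChars? digits) with
        | none => none
        | some count => (pvTokenize rest).map (fun toks => (count, ch) :: toks)
      else none  -- invalid hand piece
  termination_by s.length
  decreasing_by
    have h1 : ((c :: cs).dropWhile PySem.Chars.isdigit).length ≤ (c :: cs).length :=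
      List.length_dropWhile_le _ _
    rw [h] at h1
    simpa using h1

-- B's 'for count, ch in tokens' loop
def pvBLoop : List (Int × Char) → PySem.Dict String (PySem.Dict String Int) →
    Option (PySem.Dict String (PySem.Dict String Int))
  | [], hands => some hands
  | (count, ch) :: toks, hands =>
    match pvAddCount hands (if PySem.Chars.isupper ch then "b" else "w")
        (String.singleton (PySem.Chars.upperChar ch)) count with
    | none => none
    | some hands' => pvBLoop toks hands'

def parse_hands_py_alt (hands_part : String) : List (String × List (String × Int)) :=
  if hands_part.toList = [] ∨ hands_part.toList = ['-'] then
    pvInitHands.items.map (fun p => (p.1, p.2.items))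
  else
    match pvTokenize hands_part.toList with
    | none => []
    | some toks =>
      match pvBLoop toks pvInitHands with
      | none => []
      | some hands => hands.items.map (fun p => (p.1, p.2.items))

-- ===== PRECONDITION & SPEC =====
-- Pre_ excludes exactly the inputs on which A raises SfenError: a character that is neither a
-- digit nor a hand-piece letter (invalid hand piece), or a trailing digit (dangling number).
def Pre_parse_hands_py (hands_part : String) : Prop :=
  hands_part.toList = [] ∨ hands_part.toList = ['-'] ∨
  (hands_part.toList.all (fun c => PySem.Chars.isdigit c ||
      ['R', 'B', 'G', 'S', 'N', 'L', 'P'].contains (PySem.Chars.upperChar c)) = true ∧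
   hands_part.toList.getLast?.all (fun c => !PySem.Chars.isdigit c) = true)
instance (hands_part : String) : Decidable (Pre_parse_hands_py hands_part) := by
  unfold Pre_parse_hands_py; infer_instance

def pvWitness_parse_hands_py : String := "R2b3p"

def Spec_parse_hands_py (hands_part : String) (out : List (String × List (String × Int))) : Prop :=
  out = parse_hands_py_alt hands_part
instance (hands_part : String) (out : List (String × List (String × Int))) :
    Decidable (Spec_parse_hands_py hands_part out) := by unfold Spec_parse_hands_py; infer_instance

-- ===== CLAIM (what is proved, stated in full; the proofs are below) =====
def Claim_equal_parse_hands_py : Prop := ∀ (hands_part : String), Dom_parse_hands_py hands_part → Pre_parse_hands_py hands_part → Spec_parse_hands_py hands_part (parse_hands_py hands_part)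

-- ===== LEMMAS AND PROOFS =====
theorem pvTokenize_nil_drop (c : Char) (cs : List Char)
    (hd : (c :: cs).dropWhile PySem.Chars.isdigit = []) : pvTokenize (c :: cs) = none := by
  rw [pvTokenize]
  split
  · rfl
  · next ch rest heq => rw [hd] at heq; cases heq

theorem pvTokenize_cons_drop (c : Char) (cs : List Char) (ch : Char) (rest : List Char)
    (hd : (c :: cs).dropWhile PySem.Chars.isdigit = ch :: rest) :
    pvTokenize (c :: cs) =
      (if String.singleton (PySem.Chars.upperChar ch) ∈ pvHandOrder then
        match (if (c :: cs).takeWhile PySem.Chars.isdigit = [] then some (1 : Int)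
               else PySem.Int.ofChars? ((c :: cs).takeWhile PySem.Chars.isdigit)) with
        | none => none
        | some count => (pvTokenize rest).map (fun toks => (count, ch) :: toks)
      else none) := by
  rw [pvTokenize]
  split
  · next heq => rw [hd] at heq; cases heq
  · next ch' rest' heq =>
    rw [hd] at heq
    injection heq with h1 h2
    subst h1; subst h2
    rfl

theorem pv_takeWhile_digits (buf t : List Char) (h : ∀ c ∈ buf, PySem.Chars.isdigit c = true) :
    (buf ++ t).takeWhile PySem.Chars.isdigit = buf ++ t.takeWhile PySem.Chars.isdigit := by
  induction buf with
  | nil => simp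
  | cons a b ih => simp_all

theorem pv_dropWhile_digits (buf t : List Char) (h : ∀ c ∈ buf, PySem.Chars.isdigit c = true) :
    (buf ++ t).dropWhile PySem.Chars.isdigit = t.dropWhile PySem.Chars.isdigit := by
  induction buf with
  | nil => simp
  | cons a b ih => simp_all

-- the interleaved state machine equals tokenize-then-apply, exceptions (Option) included
theorem pv_main (cs : List Char) : ∀ (buf : List Char)
    (hands : PySem.Dict String (PySem.Dict String Int)),
    (∀ c ∈ buf, PySem.Chars.isdigit c = true) →
    (match pvALoop cs buf hands with
     | none => none
     | some (h, nb) => if nb = [] then some h else none)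
    = (pvTokenize (buf ++ cs)).bind (fun toks => pvBLoop toks hands) := by
  induction cs with
  | nil =>
    intro buf hands hbuf
    simp only [pvALoop, List.append_nil]
    match hb : buf with
    | [] => simp [pvTokenize, pvBLoop]
    | b :: bs =>
      have hall : ∀ c ∈ (b :: bs), PySem.Chars.isdigit c = true := hb ▸ hbuf
      have hd : (b :: bs).dropWhile PySem.Chars.isdigit = [] :=
        List.dropWhile_eq_nil_iff.mpr hall
      rw [pvTokenize_nil_drop b bs hd]
      simp
  | cons c cs' ih =>
    intro buf hands hbuf
    by_cases hdig : PySem.Chars.isdigit c = true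
    · -- digit: A buffers it; the tokenizer's digit run absorbs it
      have h1 : pvALoop (c :: cs') buf hands = pvALoop cs' (buf ++ [c]) hands := by
        simp [pvALoop, hdig]
      rw [h1]
      have h2 : buf ++ c :: cs' = (buf ++ [c]) ++ cs' := by simp
      rw [h2]
      exact ih (buf ++ [c]) hands (by
        intro x hx
        rcases List.mem_append.mp hx with h | h
        · exact hbuf x h
        · simp at h; subst h; exact hdig)
    · -- piece (or invalid) char: one token is consumed
      have hdig' : PySem.Chars.isdigit c = false := by simpa using hdig
      have hdw : (buf ++ c :: cs').dropWhile PySem.Chars.isdigit = c :: cs' := by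
        rw [pv_dropWhile_digits _ _ hbuf]; simp [hdig']
      have htw : (buf ++ c :: cs').takeWhile PySem.Chars.isdigit = buf := by
        rw [pv_takeWhile_digits _ _ hbuf]; simp [hdig']
      have hTok : pvTokenize (buf ++ c :: cs') =
          (if String.singleton (PySem.Chars.upperChar c) ∈ pvHandOrder then
            match (if buf = [] then some (1 : Int) else PySem.Int.ofChars? buf) with
            | none => none
            | some count => (pvTokenize cs').map (fun toks => (count, c) :: toks)
          else none) := by
        cases hbc : buf ++ c :: cs' with
        | nil => cases buf <;> simp_all
        | cons d ds =>
          rw [← hbc]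
          rw [hbc] at hdw htw
          rw [hbc, pvTokenize_cons_drop d ds c cs' hdw, htw]
      rw [hTok]
      have hAL : pvALoop (c :: cs') buf hands =
          (if String.singleton (PySem.Chars.upperChar c) ∈ pvHandOrder then
            match (if buf = [] then some (1 : Int) else PySem.Int.ofChars? buf) with
            | none => none
            | some count =>
              match pvAddCount hands (if PySem.Chars.isupper c then "b" else "w")
                  (String.singleton (PySem.Chars.upperChar c)) count with
              | none => none
              | some hands' => pvALoop cs' [] hands'
          else none) := by
        simp [pvALoop, hdig']
      rw [hAL]
      by_cases hmem : String.singleton (PySem.Chars.upperChar c) ∈ pvHandOrder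
      · rw [if_pos hmem, if_pos hmem]
        cases (if buf = [] then some (1 : Int) else PySem.Int.ofChars? buf) with
        | none => simp
        | some count =>
          simp only []
          cases hadd : pvAddCount hands (if PySem.Chars.isupper c then "b" else "w")
              (String.singleton (PySem.Chars.upperChar c)) count with
          | none =>
            -- A stops here; B's tokenizer may go on but pvBLoop stops on the same token
            cases htk : pvTokenize cs' with
            | none => simp
            | some toks => simp [pvBLoop, hadd]
          | some hands' =>
            have hrec := ih [] hands' (by simp)
            simp only [List.nil_append] at hrec
            cases htk : pvTokenize cs' with
            | none =>
              rw [htk] at hrec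
              simp only [Option.bind_none] at hrec
              rw [hrec]
              simp
            | some toks =>
              rw [htk] at hrec
              simp only [Option.bind_some] at hrec
              rw [hrec]
              simp [pvBLoop, hadd]
      · rw [if_neg hmem, if_neg hmem]
        simp

-- ===== VERDICT (by name: the statement is the Claim_ definition above) =====
theorem parse_hands_py_spec : Claim_equal_parse_hands_py := by
  intro s _ _
  unfold Spec_parse_hands_py parse_hands_py parse_hands_py_alt
  by_cases hguard : s.toList = [] ∨ s.toList = ['-']
  · rw [if_pos hguard, if_pos hguard]
  · rw [if_neg hguard, if_neg hguard]
    have hmain := pv_main s.toList [] pvInitHands (by simp)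
    simp only [List.nil_append] at hmain
    cases hA : pvALoop s.toList [] pvInitHands with
    | none =>
      rw [hA] at hmain
      simp only [] at hmain ⊢
      cases htk : pvTokenize s.toList with
      | none => rfl
      | some toks =>
        rw [htk] at hmain
        simp only [Option.bind_some] at hmain
        simp only []
        rw [← hmain]
    | some r =>
      obtain ⟨h, nb⟩ := r
      rw [hA] at hmain
      simp only [] at hmain ⊢
      by_cases hnb : nb = []
      · rw [if_pos hnb] at hmain ⊢
        cases htk : pvTokenize s.toList with
        | none => rw [htk] at hmain; simp at hmain
        | some toks =>
          rw [htk] at hmain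
          simp only [Option.bind_some] at hmain
          simp only []
          rw [← hmain]
      · rw [if_neg hnb] at hmain ⊢
        cases htk : pvTokenize s.toList with
        | none => rfl
        | some toks =>
          rw [htk] at hmain
          simp only [Option.bind_some] at hmain
          simp only []
          rw [← hmain]
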